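-- pv_equiv track=rewrite | github.com/Jmoz1/NeoAssistantPro | asset_selector.py | select_all_assets
-- ===== SOURCE A (Python) =====
-- def select_all_assets(assets, perfil_riesgo="moderado", preferencias=None):
--     """
--     Selecciona activos de todos los mercados según perfil de riesgo y preferencias.
--
--     Args:
--         assets (list): Lista de activos.
--         perfil_riesgo (str): Perfil de riesgo.
--         preferencias (dict, opcional): Preferencias para filtrar activos.
--
--     Returns:
--         list: Activos seleccionados.
--     """
--     activos_filtrados = assets
--     # Filtrar por preferencias (sector, tipo, etc.)
--     if preferencias:
--         for clave, valor in preferencias.items():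
--             activos_filtrados = [
--                 a for a in activos_filtrados if a.get(clave) == valor
--             ]
--     # Filtrar por perfil de riesgo (simulado)
--     if perfil_riesgo == "bajo":
--         activos_filtrados = [a for a in activos_filtrados if a.get("riesgo", "moderado") != "alto"]
--     elif perfil_riesgo == "alto":
--         activos_filtrados = [a for a in activos_filtrados if a.get("riesgo", "moderado") != "bajo"]
--     return activos_filtrados
-- ===== SOURCE B (Python) =====
-- def select_all_assets(assets, perfil_riesgo="moderado", preferencias=None):
--     prefs = list((preferencias or {}).items())
--
--     def keep(a):
--         if any(a.get(k) != v for k, v in prefs):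
--             return False
--         r = a.get("riesgo", "moderado")
--         if perfil_riesgo == "bajo":
--             return r != "alto"
--         if perfil_riesgo == "alto":
--             return r != "bajo"
--         return True
--
--     return [a for a in assets if keep(a)]
-- ===== Notes on version B (the rewrite author's own statement) =====
-- stated objective: alternative
-- what changed: B makes a single pass over assets with one combined predicate (all preference pairs plus the risk condition fused together), instead of A's sequence of separate full filter passes, one per preference key plus one for risk.
import Mathlib
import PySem

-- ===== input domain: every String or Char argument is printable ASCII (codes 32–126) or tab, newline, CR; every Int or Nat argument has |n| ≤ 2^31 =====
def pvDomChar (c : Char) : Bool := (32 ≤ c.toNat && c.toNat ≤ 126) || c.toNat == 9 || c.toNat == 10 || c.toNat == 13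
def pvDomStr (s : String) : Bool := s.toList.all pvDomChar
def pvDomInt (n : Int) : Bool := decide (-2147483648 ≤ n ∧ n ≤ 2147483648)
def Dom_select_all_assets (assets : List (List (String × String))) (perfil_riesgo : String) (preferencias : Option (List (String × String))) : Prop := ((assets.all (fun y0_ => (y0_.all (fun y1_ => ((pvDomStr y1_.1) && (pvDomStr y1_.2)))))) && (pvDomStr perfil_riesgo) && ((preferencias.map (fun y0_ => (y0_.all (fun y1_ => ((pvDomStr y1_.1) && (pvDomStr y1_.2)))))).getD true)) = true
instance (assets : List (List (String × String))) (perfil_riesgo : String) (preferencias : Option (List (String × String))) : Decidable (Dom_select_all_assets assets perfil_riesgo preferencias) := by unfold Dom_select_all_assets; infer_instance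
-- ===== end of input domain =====

-- B replaces A's sequence of full filtering passes (one per preference key, plus the risk
-- pass) with a single traversal using one combined predicate (objective: alternative,
-- single-pass decomposition; return value only, no mutation involved).

-- ===== PORT A =====
def select_all_assets (assets : List (List (String × String))) (perfil_riesgo : String) (preferencias : Option (List (String × String))) : List (List (String × String)) :=
  let activos := assets
  -- if preferencias: (falsy = None or empty dict)
  let activos :=
    match preferencias with
    | none => activos
    | some prefs =>
      if prefs.isEmpty then activos
      else
        prefs.foldl (fun acc kv =>
          acc.filter (fun a => (PySem.Dict.mk a).get? kv.1 == some kv.2)) activos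
  if perfil_riesgo == "bajo" then
    activos.filter (fun a => (PySem.Dict.mk a).getD "riesgo" "moderado" != "alto")
  else if perfil_riesgo == "alto" then
    activos.filter (fun a => (PySem.Dict.mk a).getD "riesgo" "moderado" != "bajo")
  else activos

-- ===== PORT B =====
def pvKeep (perfil_riesgo : String) (prefs : List (String × String)) (a : List (String × String)) : Bool :=
  if prefs.any (fun kv => !((PySem.Dict.mk a).get? kv.1 == some kv.2)) then false
  else
    let r := (PySem.Dict.mk a).getD "riesgo" "moderado"
    if perfil_riesgo == "bajo" then r != "alto"
    else if perfil_riesgo == "alto" then r != "bajo"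
    else true

def select_all_assets_alt (assets : List (List (String × String))) (perfil_riesgo : String) (preferencias : Option (List (String × String))) : List (List (String × String)) :=
  let prefs := preferencias.getD []
  assets.filter (pvKeep perfil_riesgo prefs)

-- ===== PRECONDITION & SPEC =====
def Spec_select_all_assets (assets : List (List (String × String))) (perfil_riesgo : String) (preferencias : Option (List (String × String))) (out : List (List (String × String))) : Prop := out = select_all_assets_alt assets perfil_riesgo preferencias
instance (assets : List (List (String × String))) (perfil_riesgo : String) (preferencias : Option (List (String × String))) (out : List (List (String × String))) : Decidable (Spec_select_all_assets assets perfil_riesgo preferencias out) := by unfold Spec_select_all_assets; infer_instance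

-- ===== CLAIM (what is proved, stated in full; the proofs are below) =====
def Claim_equal_select_all_assets : Prop := ∀ (assets : List (List (String × String))) (perfil_riesgo : String) (preferencias : Option (List (String × String))), Dom_select_all_assets assets perfil_riesgo preferencias → Spec_select_all_assets assets perfil_riesgo preferencias (select_all_assets assets perfil_riesgo preferencias)

-- ===== LEMMAS AND PROOFS =====

-- A's successive filter passes, one per preference pair, equal one filter by the conjunction.
theorem foldl_filter_eq_filter_all (p : (String × String) → List (String × String) → Bool)
    (prefs : List (String × String)) (xs : List (List (String × String))) :
    prefs.foldl (fun acc kv => acc.filter (p kv)) xs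
      = xs.filter (fun a => prefs.all (fun kv => p kv a)) := by
  induction prefs generalizing xs with
  | nil => simp
  | cons kv rest ih =>
    simp [List.foldl_cons, ih, List.filter_filter, Bool.and_comm]

-- pvKeep is the conjunction of the preference test and the risk test.
theorem pvKeep_eq (perfil_riesgo : String) (prefs : List (String × String)) (a : List (String × String)) :
    pvKeep perfil_riesgo prefs a
      = (prefs.all (fun kv => (PySem.Dict.mk a).get? kv.1 == some kv.2)
          && (if perfil_riesgo == "bajo" then (PySem.Dict.mk a).getD "riesgo" "moderado" != "alto"
              else if perfil_riesgo == "alto" then (PySem.Dict.mk a).getD "riesgo" "moderado" != "bajo"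
              else true)) := by
  unfold pvKeep
  rw [show prefs.all (fun kv => (PySem.Dict.mk a).get? kv.1 == some kv.2)
        = !prefs.any (fun kv => !((PySem.Dict.mk a).get? kv.1 == some kv.2)) by
      simp [List.all_eq_not_any_not]]
  cases prefs.any (fun kv => !((PySem.Dict.mk a).get? kv.1 == some kv.2)) <;> simp

-- ===== VERDICT (by name: the statement is the Claim_ definition above) =====
theorem select_all_assets_spec : Claim_equal_select_all_assets := by
  intro assets perfil preferencias _
  unfold Spec_select_all_assets select_all_assets select_all_assets_alt
  have key : ∀ prefs : List (String × String),
      (if perfil == "bajo" then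
        (prefs.foldl (fun acc kv => acc.filter (fun a => (PySem.Dict.mk a).get? kv.1 == some kv.2)) assets).filter
          (fun a => (PySem.Dict.mk a).getD "riesgo" "moderado" != "alto")
      else if perfil == "alto" then
        (prefs.foldl (fun acc kv => acc.filter (fun a => (PySem.Dict.mk a).get? kv.1 == some kv.2)) assets).filter
          (fun a => (PySem.Dict.mk a).getD "riesgo" "moderado" != "bajo")
      else prefs.foldl (fun acc kv => acc.filter (fun a => (PySem.Dict.mk a).get? kv.1 == some kv.2)) assets)
      = assets.filter (pvKeep perfil prefs) := by
    intro prefs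
    rw [foldl_filter_eq_filter_all (fun kv a => (PySem.Dict.mk a).get? kv.1 == some kv.2)]
    have hk : pvKeep perfil prefs
        = (fun x => (prefs.all (fun kv => (PySem.Dict.mk x).get? kv.1 == some kv.2))
            && (if perfil == "bajo" then (PySem.Dict.mk x).getD "riesgo" "moderado" != "alto"
                else if perfil == "alto" then (PySem.Dict.mk x).getD "riesgo" "moderado" != "bajo"
                else true)) := funext (pvKeep_eq perfil prefs)
    cases hb : (perfil == "bajo") <;> cases ha : (perfil == "alto") <;>
      simp [hb, ha, List.filter_filter, hk, Bool.and_comm]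
  cases preferencias with
  | none =>
    dsimp only [Option.getD]
    exact key []
  | some prefs =>
    cases prefs with
    | nil =>
      dsimp only [Option.getD, List.isEmpty]
      exact key []
    | cons kv rest =>
      dsimp only [Option.getD, List.isEmpty]
      exact key (kv :: rest)
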